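-- pv_equiv track=rewrite | github.com/biswajitfsd/DSA | strings/patternMatcher.py | get_counts_and_first_y
-- ===== SOURCE A (Python) =====
-- def get_counts_and_first_y(pattern_array):
--     hash_pattern = {}
--     first_y = -1
--     for i in range(len(pattern_array)):
--         if pattern_array[i] in hash_pattern.keys():
--             hash_pattern[pattern_array[i]] = hash_pattern[pattern_array[i]] + 1
--         else:
--             if pattern_array[i] == "y":
--                 first_y = i
--             hash_pattern[pattern_array[i]] = 1
--
--     return first_y, hash_pattern
-- ===== SOURCE B (Python) =====
-- def get_counts_and_first_y(pattern_array):
--     counts = {x: pattern_array.count(x) for x in dict.fromkeys(pattern_array)}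
--     try:
--         first_y = pattern_array.index("y")
--     except ValueError:
--         first_y = -1
--     return first_y, counts
-- ===== Notes on version B (the rewrite author's own statement) =====
-- stated objective: alternative
-- what changed: A's single interleaved loop that maintains a running count dict (with membership branching) and captures first-y inline is replaced by a comprehension over the deduplicated keys that computes each frequency with list.count (per-key nested scan, no accumulator dict), plus a try/except list.index lookup for the first 'y'.
import Mathlib
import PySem

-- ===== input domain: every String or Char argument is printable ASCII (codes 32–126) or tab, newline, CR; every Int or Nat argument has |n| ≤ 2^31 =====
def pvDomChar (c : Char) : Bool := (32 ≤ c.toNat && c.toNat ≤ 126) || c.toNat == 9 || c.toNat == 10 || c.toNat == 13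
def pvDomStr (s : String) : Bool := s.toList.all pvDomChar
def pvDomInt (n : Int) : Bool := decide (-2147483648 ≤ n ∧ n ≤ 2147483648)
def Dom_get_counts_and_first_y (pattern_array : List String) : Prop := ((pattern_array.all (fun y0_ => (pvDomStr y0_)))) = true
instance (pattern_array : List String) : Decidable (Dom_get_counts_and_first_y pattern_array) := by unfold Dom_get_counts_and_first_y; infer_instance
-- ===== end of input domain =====

-- B replaces A's single interleaved counting loop (accumulator dict + inline first-y capture)
-- with a per-key count over the deduplicated keys and a separate list.index lookup for 'y'.


-- ===== PORT A =====
-- for i in range(len(pattern_array)): branch on membership, set first_y on a fresh "y", insert/bump the count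
def get_counts_and_first_y (pattern_array : List String) : Int × (List (String × Int)) :=
  let st := (PySem.List.pyRange 0 (PySem.List.len pattern_array) 1).foldl
    (fun (st : PySem.Dict String Int × Int) i =>
      let x := PySem.List.pyGetD pattern_array i ""
      if st.1.contains x then
        (st.1.insert x (st.1.getD x 0 + 1), st.2)
      else
        (st.1.insert x 1, if x == "y" then i else st.2))
    (PySem.Dict.empty, -1)
  (st.2, st.1.items)

-- ===== PORT B =====
-- {x: pattern_array.count(x) for x in dict.fromkeys(pattern_array)}; try: index("y") except ValueError: -1
def get_counts_and_first_y_alt (pattern_array : List String) : Int × (List (String × Int)) :=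
  let counts := (PySem.List.dedup pattern_array).map
    (fun x => (x, (pattern_array.count x : Int)))
  let first_y : Int :=
    match PySem.List.index? pattern_array "y" with
    | some k => (k : Int)
    | none => -1
  (first_y, counts)

-- ===== PRECONDITION & SPEC =====
def Spec_get_counts_and_first_y (pattern_array : List String) (out : Int × (List (String × Int))) : Prop := out = get_counts_and_first_y_alt pattern_array
instance (pattern_array : List String) (out : Int × (List (String × Int))) : Decidable (Spec_get_counts_and_first_y pattern_array out) := by unfold Spec_get_counts_and_first_y; infer_instance

-- ===== CLAIM (what is proved, stated in full; the proofs are below) =====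
def Claim_equal_get_counts_and_first_y : Prop := ∀ (pattern_array : List String), Dom_get_counts_and_first_y pattern_array → Spec_get_counts_and_first_y pattern_array (get_counts_and_first_y pattern_array)

-- ===== LEMMAS AND PROOFS =====

-- A's loop over indices, rewritten via enumerate, computes the standard counting fold together with
-- "first index of a fresh 'y'": the invariant, generalized over start index and running state.
theorem pvLoopA_eq (xs : List String) (s : Int) (d : PySem.Dict String Int) (fy : Int) :
    (PySem.List.enumerate xs s).foldl
      (fun (st : PySem.Dict String Int × Int) ix =>
        if st.1.contains ix.2 then
          (st.1.insert ix.2 (st.1.getD ix.2 0 + 1), st.2)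
        else
          (st.1.insert ix.2 1, if ix.2 == "y" then ix.1 else st.2))
      (d, fy)
    = (xs.foldl (fun (d : PySem.Dict String Int) x => d.insert x (d.getD x 0 + 1)) d,
       if d.contains "y" then fy else
         match PySem.List.index? xs "y" with
         | some k => s + (k : Int)
         | none => fy) := by
  induction xs generalizing s d fy with
  | nil => simp [PySem.List.enumerate]
  | cons x xs ih =>
    rw [PySem.List.enumerate_cons, List.foldl_cons, List.foldl_cons]
    by_cases hc : d.contains x
    · rw [if_pos hc]
      rw [ih]
      by_cases hy : x = "y"
      · subst hy
        rw [PySem.List.index?_cons_self]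
        simp [hc]
      · rw [PySem.List.index?_cons_of_ne xs hy]
        have : ((d.insert x (d.getD x 0 + 1)).contains "y") = d.contains "y" := by
          rw [PySem.Dict.contains_insert]
          simp [beq_iff_eq, Ne.symm hy]
        rw [this]
        by_cases hdy : d.contains "y"
        · simp [hdy]
        · simp only [Bool.not_eq_true] at hdy
          simp only [hdy, if_neg Bool.false_ne_true]
          cases h : PySem.List.index? xs "y" with
          | none => simp
          | some k => simp; ring
    · rw [if_neg hc]
      have h0 : d.getD x 0 = 0 := PySem.Dict.getD_of_not_contains d 0 (by simpa using hc)
      have hins : d.insert x 1 = d.insert x (d.getD x 0 + 1) := by rw [h0, zero_add]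
      rw [hins, ih]
      by_cases hy : x = "y"
      · subst hy
        rw [PySem.List.index?_cons_self]
        have hcy : d.contains "y" = false := by simpa using hc
        simp [hcy]
      · have heq : ((d.insert x (d.getD x 0 + 1)).contains "y") = d.contains "y" := by
          rw [PySem.Dict.contains_insert]
          simp [beq_iff_eq, Ne.symm hy]
        rw [heq, PySem.List.index?_cons_of_ne xs hy]
        have hxy : (x == "y") = false := by simp [hy]
        by_cases hdy : d.contains "y"
        · simp [hdy, hxy]
        · simp only [Bool.not_eq_true] at hdy
          simp only [hdy, if_neg Bool.false_ne_true, hxy]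
          cases h : PySem.List.index? xs "y" with
          | none => simp
          | some k => simp; ring

-- ===== VERDICT (by name: the statement is the Claim_ definition above) =====
theorem get_counts_and_first_y_spec : Claim_equal_get_counts_and_first_y := by
  intro xs _
  unfold Spec_get_counts_and_first_y get_counts_and_first_y get_counts_and_first_y_alt
  have hfold : (PySem.List.pyRange 0 (PySem.List.len xs) 1).foldl
      (fun (st : PySem.Dict String Int × Int) i =>
        let x := PySem.List.pyGetD xs i ""
        if st.1.contains x then
          (st.1.insert x (st.1.getD x 0 + 1), st.2)
        else
          (st.1.insert x 1, if x == "y" then i else st.2))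
      (PySem.Dict.empty, -1)
    = (PySem.List.enumerate xs 0).foldl
      (fun (st : PySem.Dict String Int × Int) ix =>
        if st.1.contains ix.2 then
          (st.1.insert ix.2 (st.1.getD ix.2 0 + 1), st.2)
        else
          (st.1.insert ix.2 1, if ix.2 == "y" then ix.1 else st.2))
      (PySem.Dict.empty, -1) := by
    rw [PySem.List.enumerate_eq_map_pyRange xs "", List.foldl_map]
  rw [hfold, pvLoopA_eq]
  simp only [PySem.Dict.contains_empty, if_neg Bool.false_ne_true]
  have hitems : (List.foldl (fun (d : PySem.Dict String Int) x => d.insert x (d.getD x 0 + 1))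
      PySem.Dict.empty xs).items
      = (PySem.List.dedup xs).map (fun x => (x, (xs.count x : Int))) := by
    rw [PySem.Dict.foldl_insert_getD_add_one_eq_counter, PySem.Dict.items_counter,
        PySem.List.dedup_eq_ofList]
  rw [hitems]
  cases h : PySem.List.index? xs "y" with
  | none => simp
  | some k => simp
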